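-- pv_equiv track=rewrite | github.com/fl1pcoin/LaserWeldMonitor | cv_postprocessing/weld_processing/read_mask.py | diag
-- ===== SOURCE A (Python) =====
-- def diag(matrix):
--     ind_i = 0
--     for i in matrix:
--         ind_j = 0
--         for j in i:
--             if ind_i==ind_j:
--                 if j==255:
--                     return (ind_i,ind_j)
--                 else:
--                     ind_j+=1
--             else:
--                 ind_j+=1
--         ind_i+=1
-- ===== SOURCE B (Python) =====
-- def diag(matrix):
--     for i, row in enumerate(matrix):
--         if i < len(row) and row[i] == 255:
--             return (i, i)
--     return None
-- ===== Notes on version B (the rewrite author's own statement) =====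
-- stated objective: alternative
-- what changed: B checks only the diagonal entry row[i] per row via enumerate with a bounds check, instead of A's full inner-row scan comparing every column index against the row index.
import Mathlib
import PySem

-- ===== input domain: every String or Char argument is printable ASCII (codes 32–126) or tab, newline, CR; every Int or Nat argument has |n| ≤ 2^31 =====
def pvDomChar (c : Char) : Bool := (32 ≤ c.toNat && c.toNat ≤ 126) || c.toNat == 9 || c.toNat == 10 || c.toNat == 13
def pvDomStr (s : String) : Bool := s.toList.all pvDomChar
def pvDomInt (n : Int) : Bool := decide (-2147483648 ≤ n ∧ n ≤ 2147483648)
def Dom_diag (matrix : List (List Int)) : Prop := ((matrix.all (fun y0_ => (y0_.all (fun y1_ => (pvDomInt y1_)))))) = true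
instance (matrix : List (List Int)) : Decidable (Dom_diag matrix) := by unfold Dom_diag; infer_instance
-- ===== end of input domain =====

-- B replaces A's full inner-row scan by a single bounds-checked diagonal lookup per row (alternative decomposition).

-- ===== PORT A =====
-- inner 'for j in i' loop of A, carrying ind_i and ind_j
def diagInnerA (ind_i : Int) : Int → List Int → Option (Int × Int)
  | _, [] => none
  | ind_j, j :: rest =>
    if ind_i = ind_j then
      if j = 255 then some (ind_i, ind_j) else diagInnerA ind_i (ind_j + 1) rest
    else diagInnerA ind_i (ind_j + 1) rest

-- outer 'for i in matrix' loop of A, carrying ind_i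
def diagOuterA : Int → List (List Int) → Option (Int × Int)
  | _, [] => none
  | ind_i, row :: rest =>
    match diagInnerA ind_i 0 row with
    | some p => some p
    | none => diagOuterA (ind_i + 1) rest

def diag (matrix : List (List Int)) : Option (Int × Int) := diagOuterA 0 matrix

-- ===== PORT B =====
-- B: 'for i, row in enumerate(matrix): if i < len(row) and row[i] == 255: return (i, i)'
def diagAltGo : Int → List (List Int) → Option (Int × Int)
  | _, [] => none
  | i, row :: rest =>
    if i < (row.length : Int) && (PySem.List.pyGet? row i == some 255) then some (i, i)
    else diagAltGo (i + 1) rest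

def diag_alt (matrix : List (List Int)) : Option (Int × Int) := diagAltGo 0 matrix

-- ===== PRECONDITION & SPEC =====
def Spec_diag (matrix : List (List Int)) (out : Option (Int × Int)) : Prop := out = diag_alt matrix
instance (matrix : List (List Int)) (out : Option (Int × Int)) : Decidable (Spec_diag matrix out) := by unfold Spec_diag; infer_instance

-- ===== CLAIM (what is proved, stated in full; the proofs are below) =====
def Claim_equal_diag : Prop := ∀ (matrix : List (List Int)), Dom_diag matrix → Spec_diag matrix (diag matrix)

-- ===== LEMMAS AND PROOFS =====

-- when the row index is already past the diagonal column, A's inner loop never matches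
theorem diagInnerA_none (row : List Int) : ∀ (i j : Int), i < j → diagInnerA i j row = none := by
  induction row with
  | nil => intro i j _; rfl
  | cons x rest ih =>
    intro i j h
    simp only [diagInnerA]
    rw [if_neg (by omega : ¬ i = j)]
    exact ih i (j + 1) (by omega)

-- A's inner loop finds exactly the element at offset i - j, if any, and tests it against 255
theorem diagInnerA_eq (row : List Int) : ∀ (i j : Int), j ≤ i →
    diagInnerA i j row =
      (if PySem.List.pyGet? row (i - j) = some 255 then some (i, i) else none) := by
  induction row with
  | nil => intro i j _; simp [diagInnerA, PySem.List.pyGet?]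
  | cons x rest ih =>
    intro i j hji
    by_cases h : i = j
    · subst h
      have h0 : i - i = (0:Int) := by ring
      rw [h0]
      simp only [diagInnerA]
      by_cases hx : x = 255
      · simp [hx]
      · simp only [hx]
        rw [diagInnerA_none rest i (i + 1) (by omega)]
        simp [hx]
    · have hlt : j < i := lt_of_le_of_ne hji (fun e => h e.symm)
      simp only [diagInnerA, if_neg h]
      rw [ih i (j + 1) (by omega)]
      have hget : PySem.List.pyGet? (x :: rest) (i - j) = PySem.List.pyGet? rest (i - (j + 1)) := by
        rw [PySem.List.pyGet?_of_nonneg (x :: rest) (by omega : (0:Int) ≤ i - j),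
            PySem.List.pyGet?_of_nonneg rest (by omega : (0:Int) ≤ i - (j + 1))]
        have ht : (i - j).toNat = (i - (j + 1)).toNat + 1 := by omega
        rw [ht]; simp
      rw [hget]

theorem diagOuterA_eq_altGo : ∀ (l : List (List Int)) (i : Int), 0 ≤ i →
    diagOuterA i l = diagAltGo i l := by
  intro l
  induction l with
  | nil => intro i _; rfl
  | cons row rest ih =>
    intro i hi
    simp only [diagOuterA, diagAltGo]
    rw [diagInnerA_eq row i 0 hi]
    simp only [sub_zero]
    by_cases hg : PySem.List.pyGet? row i = some 255
    · have hr : PySem.Raise.InRange row.length i := by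
        by_contra hn
        rw [← PySem.List.pyGet?_eq_none_iff] at hn
        simp [hn] at hg
      have hlt : i < (row.length : Int) := hr.2
      simp [hg, hlt]
    · have hb : (decide (i < (row.length : Int)) && (PySem.List.pyGet? row i == some 255)) = false := by
        simp [hg]
      rw [hb]
      simp only [if_neg hg, Bool.false_eq_true, if_false]
      exact ih (i + 1) (by omega)

-- ===== VERDICT (by name: the statement is the Claim_ definition above) =====
theorem diag_spec : Claim_equal_diag := by
  intro matrix _
  unfold Spec_diag diag diag_alt
  exact diagOuterA_eq_altGo matrix 0 le_rfl
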